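-- pv_equiv track=rewrite | github.com/EnglishGuy69/AdventOfCode2024 | 21 - Keypad Conundrum/keyboard_conundrum.py | compress_instructions
-- ===== SOURCE A (Python) =====
-- def compress_instructions(instructions: str) -> {(str, int)}:
--     ret = {}
--     for instruction in [i+'A' for i in instructions.split('A')][:-1]:
--         if instruction in ret:
--             ret[instruction] += 1
--         else:
--             ret[instruction] = 1
--     return ret
-- ===== SOURCE B (Python) =====
-- def compress_instructions(instructions: str) -> {(str, int)}:
--     # One pass over the characters with a running buffer; each 'A' closes a
--     # segment which is counted immediately. A trailing partial segment (no
--     # final 'A') is never flushed, matching the dropped last piece.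
--     counts = {}
--     buffer = ''
--     for ch in instructions:
--         buffer += ch
--         if ch == 'A':
--             counts[buffer] = counts.get(buffer, 0) + 1
--             buffer = ''
--     return counts
-- ===== Notes on version B (the rewrite author's own statement) =====
-- stated objective: alternative
-- what changed: Replaces split('A')+map+drop-last over a materialised segment list by a single character pass with a running buffer that is counted and reset at each 'A' (a trailing unterminated buffer is simply never flushed).
import Mathlib
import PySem

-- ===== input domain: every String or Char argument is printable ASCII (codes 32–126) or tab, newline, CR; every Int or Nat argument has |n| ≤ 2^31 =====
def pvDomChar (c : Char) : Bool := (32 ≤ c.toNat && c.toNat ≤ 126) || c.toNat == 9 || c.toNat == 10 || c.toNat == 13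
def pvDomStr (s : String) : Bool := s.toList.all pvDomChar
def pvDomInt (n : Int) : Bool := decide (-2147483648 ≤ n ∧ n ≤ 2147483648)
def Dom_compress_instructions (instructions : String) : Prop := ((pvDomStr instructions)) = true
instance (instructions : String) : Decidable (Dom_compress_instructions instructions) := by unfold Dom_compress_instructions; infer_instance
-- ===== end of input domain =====

-- B replaces A's split/map/drop-last segment list by a single buffered character pass; same O(n) cost.

-- ===== PORT A =====
-- loop body: if instruction in ret: ret[instruction] += 1 else: ret[instruction] = 1
def pvCountA (d : PySem.Dict String Int) (instruction : String) : PySem.Dict String Int :=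
  if d.contains instruction then d.modify instruction 0 (· + 1)
  else d.insert instruction 1

def compress_instructions (instructions : String) : List (String × Int) :=
  let pieces := PySem.Chars.splitOn instructions.toList ['A']
  let segs := PySem.List.slice (pieces.map (fun i => i ++ ['A'])) none (some (-1))
  (segs.foldl (fun d i => pvCountA d (String.mk i)) PySem.Dict.empty).items

-- ===== PORT B =====
-- loop body: buffer += ch; if ch == 'A': counts[buffer] = counts.get(buffer, 0) + 1; buffer = ''
def pvStepB (st : PySem.Dict String Int × List Char) (c : Char) :
    PySem.Dict String Int × List Char :=
  let buf := st.2 ++ [c]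
  if c = 'A' then (st.1.modify (String.mk buf) 0 (· + 1), [])
  else (st.1, buf)

def compress_instructions_alt (instructions : String) : List (String × Int) :=
  (instructions.toList.foldl pvStepB (PySem.Dict.empty, [])).1.items

-- ===== PRECONDITION & SPEC =====
def Spec_compress_instructions (instructions : String) (out : List (String × Int)) : Prop := out = compress_instructions_alt instructions
instance (instructions : String) (out : List (String × Int)) : Decidable (Spec_compress_instructions instructions out) := by unfold Spec_compress_instructions; infer_instance

-- ===== CLAIM (what is proved, stated in full; the proofs are below) =====
def Claim_equal_compress_instructions : Prop := ∀ (instructions : String), Dom_compress_instructions instructions → Spec_compress_instructions instructions (compress_instructions instructions)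

-- ===== LEMMAS AND PROOFS =====

-- (first piece, remaining pieces) of splitting a char list on 'A'
def pvSplit : List Char → List Char × List (List Char)
  | [] => ([], [])
  | c :: t =>
    if c = 'A' then ([], (pvSplit t).1 :: (pvSplit t).2)
    else (c :: (pvSplit t).1, (pvSplit t).2)

theorem pvGo_eq (fuel : Nat) : ∀ (l cur : List Char) (acc : List (List Char)),
    l.length < fuel →
    PySem.Chars.splitOn.go ['A'] fuel l cur acc =
      acc.reverse ++ (cur.reverse ++ (pvSplit l).1) :: (pvSplit l).2 := by
  induction fuel with
  | zero => intro l cur acc h; omega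
  | succ n ih =>
    intro l cur acc h
    cases l with
    | nil => simp [PySem.Chars.splitOn.go, pvSplit]
    | cons c t =>
      rw [PySem.Chars.splitOn.go]
      by_cases hc : c = 'A'
      · subst hc
        have hp : List.isPrefixOf ['A'] ('A' :: t) = true := by
          simp [List.isPrefixOf]
        simp only [hp, if_true, List.length_cons, List.length_nil, Nat.zero_add,
          List.drop_succ_cons, List.drop_zero]
        rw [ih t [] (cur.reverse :: acc) (by simpa using Nat.lt_of_succ_lt_succ h)]
        simp [pvSplit]
      · have hp : List.isPrefixOf ['A'] (c :: t) = false := by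
          simp [List.isPrefixOf]
          exact Ne.symm hc
        simp only [hp, Bool.false_eq_true, if_false]
        rw [ih t (c :: cur) acc (by simpa using Nat.lt_of_succ_lt_succ h)]
        simp [pvSplit, hc]

theorem pvSplitOn_eq (l : List Char) :
    PySem.Chars.splitOn l ['A'] = (pvSplit l).1 :: (pvSplit l).2 := by
  unfold PySem.Chars.splitOn
  rw [pvGo_eq (l.length + 1) l [] [] (by omega)]
  simp

-- the closed ('A'-terminated) segments of l when the current buffer is buf
def pvSegs (buf : List Char) : List Char → List (List Char)
  | [] => []
  | c :: t => if c = 'A' then (buf ++ [c]) :: pvSegs [] t else pvSegs (buf ++ [c]) t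

theorem pvCountA_eq_modify (d : PySem.Dict String Int) (s : String) :
    pvCountA d s = d.modify s 0 (· + 1) := by
  unfold pvCountA
  by_cases h : d.contains s = true
  · simp [h]
  · have h' : d.contains s = false := by simpa using h
    simp [h', PySem.Dict.modify, PySem.Dict.getD_of_not_contains _ _ h']

-- B's fold computes the count fold over the closed segments
theorem pvFoldB_eq (l : List Char) : ∀ (d : PySem.Dict String Int) (buf : List Char),
    (l.foldl pvStepB (d, buf)).1 =
      (pvSegs buf l).foldl (fun d i => d.modify (String.mk i) 0 (· + 1)) d := by
  induction l with
  | nil => intro d buf; simp [pvSegs]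
  | cons c t ih =>
    intro d buf
    by_cases hc : c = 'A'
    · subst hc
      have hstep : pvStepB (d, buf) 'A' = (d.modify (String.mk (buf ++ ['A'])) 0 (· + 1), []) := by
        simp [pvStepB]
      simp only [List.foldl_cons, hstep, pvSegs, if_true, ih]
    · have hstep : pvStepB (d, buf) c = (d, buf ++ [c]) := by
        simp [pvStepB, hc]
      simp only [List.foldl_cons, hstep, pvSegs, if_neg hc, ih]

-- the closed segments are exactly A's mapped-and-truncated split pieces
theorem pvSegs_eq (l : List Char) : ∀ (buf : List Char),
    pvSegs buf l =
      (((buf ++ (pvSplit l).1) :: (pvSplit l).2).map (fun i => i ++ ['A'])).dropLast := by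
  induction l with
  | nil => intro buf; simp [pvSegs, pvSplit]
  | cons c t ih =>
    intro buf
    by_cases hc : c = 'A'
    · subst hc
      simp only [pvSegs, if_true, pvSplit, List.map_cons]
      rw [ih []]
      simp [List.dropLast_cons_of_ne_nil]
    · simp only [pvSegs, pvSplit, if_neg hc]
      rw [ih (buf ++ [c])]
      simp

-- ===== VERDICT (by name: the statement is the Claim_ definition above) =====
theorem compress_instructions_spec : Claim_equal_compress_instructions := by
  intro s _
  show compress_instructions s = compress_instructions_alt s
  unfold compress_instructions compress_instructions_alt
  simp only [pvSplitOn_eq, PySem.List.slice_to_neg_one, pvFoldB_eq, pvSegs_eq,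
    List.nil_append]
  have hf : (fun (d : PySem.Dict String Int) (i : List Char) => pvCountA d (String.mk i))
      = fun d i => d.modify (String.mk i) 0 (· + 1) := by
    funext d i; exact pvCountA_eq_modify d (String.mk i)
  rw [hf]
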